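-- pv_equiv track=rewrite | github.com/okfn/ckanext-sitesearch | ckanext/sitesearch/logic/action.py | parse_search_params
-- ===== SOURCE A (Python) =====
-- def parse_search_params(
--     data_dict, searches=["datasets", "organizations", "groups", "users"]
-- ):
--     """Support namespaced parameters for specific entity searches
--
--     Transforms the incoming data_dict with the following keys:
--
--         data_dict = {
--             "datasets.start": 0,
--             "datasets.rows": 20,
--             "datasets.facet.field": ["tags", "groups"],
--             "groups.facet.field": ["type"],
--             "q": "test",
--             "fq": "state:active",
--         }
--
--     To the following output, with the relevant parameters for each search:
--
--         search_params = {
--             "datasets": {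
--                 "start": 0,
--                 "rows": 20,
--                 "facet.field": ["tags", "groups"],
--                 "q": "test",
--                 "fq": "state:active",
--             },
--             "groups": {
--                 "facet.field": ["type"],
--                 "q": "test",
--                 "fq": "state:active",
--             },
--             "organizations": {
--                 "q": "test",
--                 "fq": "state:active",
--
--             },
--             "users": {
--                 "q": "test",
--                 "fq": "state:active",
--             },
--         }
--
--     Additional searches can be passed with the `searches` paramter. In that case,
--     parameters with that namespace will be parsed too, eg passing `news` would
--     support `news.fq`.
--     """
--
--     out = {s: {} for s in searches}
--
--     common = {}
--
--     for key, value in data_dict.items():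
--         search_ns = key.split(".")[0]
--         if search_ns in searches:
--             i = key.index(".") + 1
--             _key = key[i:]
--             out[search_ns][_key] = value
--         else:
--             common[key] = value
--
--     for search in out.keys():
--         for key, value in common.items():
--             if key not in out[search]:
--                 out[search][key] = value
--
--     return out
-- ===== SOURCE B (Python) =====
-- def parse_search_params(
--     data_dict, searches=["datasets", "organizations", "groups", "users"]
-- ):
--     out = {}
--     for s in searches:
--         named = {
--             k[k.index(".") + 1:]: v
--             for k, v in data_dict.items()
--             if k.split(".")[0] == s
--         }
--         common = {
--             k: v
--             for k, v in data_dict.items()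
--             if k.split(".")[0] not in searches and k not in named
--         }
--         out[s] = {**named, **common}
--     return out
-- ===== Notes on version B (the rewrite author's own statement) =====
-- stated objective: simpler
-- what changed: A mutates a pre-seeded dict-of-dicts in one pass over data_dict and then back-fills common params with a nested membership loop; B builds each search's result directly with two per-search dict comprehensions (namespaced entries, then the not-overridden common entries) merged by {**named, **common}.
import Mathlib
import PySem

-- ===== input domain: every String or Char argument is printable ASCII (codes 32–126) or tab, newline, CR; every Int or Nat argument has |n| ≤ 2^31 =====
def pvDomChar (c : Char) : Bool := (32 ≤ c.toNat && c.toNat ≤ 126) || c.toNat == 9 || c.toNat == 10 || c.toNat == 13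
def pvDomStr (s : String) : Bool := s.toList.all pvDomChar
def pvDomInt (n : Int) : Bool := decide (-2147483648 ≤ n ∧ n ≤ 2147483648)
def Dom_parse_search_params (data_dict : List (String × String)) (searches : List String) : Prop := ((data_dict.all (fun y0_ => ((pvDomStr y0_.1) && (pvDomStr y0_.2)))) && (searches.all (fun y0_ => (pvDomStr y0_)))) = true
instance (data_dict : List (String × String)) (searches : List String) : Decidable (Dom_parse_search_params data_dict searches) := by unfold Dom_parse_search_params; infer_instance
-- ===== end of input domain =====

-- B replaces A's mutate-then-backfill construction by direct per-search dict comprehensions (objective: simpler);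
-- return-value equivalence only (neither program mutates its arguments).

-- ===== PORT A =====
-- shared primitive helpers (both Pythons contain the very same expressions):
-- pvNs k = key.split(".")[0]; split(sep) never returns an empty list, so [0] is its head (exact)
-- pvSuf k = key[key.index(".") + 1:]; Python's str.index raises ValueError when "." is absent
-- (PySem.Str.find = -1 there): those inputs are excluded by Pre_ below, both Pythons raise on them
def pvNs (k : String) : String := String.ofList ((PySem.Chars.splitOn k.toList ['.']).headI)
def pvSuf (k : String) : String := PySem.Str.slice k (some (PySem.Str.find k "." + 1)) none

def pvAStep1 (searches : List String)
    (st : PySem.Dict String (PySem.Dict String String) × PySem.Dict String String)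
    (kv : String × String) :
    PySem.Dict String (PySem.Dict String String) × PySem.Dict String String :=
  let search_ns := pvNs kv.1
  if searches.contains search_ns then
    (st.1.modify search_ns PySem.Dict.empty (fun d => d.insert (pvSuf kv.1) kv.2), st.2)
  else
    (st.1, st.2.insert kv.1 kv.2)

def pvAStep2 (search : String) (o : PySem.Dict String (PySem.Dict String String))
    (kv : String × String) : PySem.Dict String (PySem.Dict String String) :=
  if (o.getD search PySem.Dict.empty).contains kv.1 then o
  else o.modify search PySem.Dict.empty (fun d => d.insert kv.1 kv.2)

def parse_search_params (data_dict : List (String × String)) (searches : List String) :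
    List (String × List (String × String)) :=
  let out0 : PySem.Dict String (PySem.Dict String String) :=
    searches.foldl (fun o s => o.insert s PySem.Dict.empty) PySem.Dict.empty
  let st := data_dict.foldl (pvAStep1 searches) (out0, PySem.Dict.empty)
  let out := st.1.keys.foldl (fun o search => st.2.items.foldl (pvAStep2 search) o) st.1
  out.items.map (fun p => (p.1, p.2.items))

def pvBStep (data_dict : List (String × String)) (searches : List String)
    (o : PySem.Dict String (PySem.Dict String String)) (s : String) :
    PySem.Dict String (PySem.Dict String String) :=
  let named : PySem.Dict String String :=
    data_dict.foldl (fun d kv => if pvNs kv.1 == s then d.insert (pvSuf kv.1) kv.2 else d)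
      PySem.Dict.empty
  let common : PySem.Dict String String :=
    data_dict.foldl
      (fun d kv => if !searches.contains (pvNs kv.1) && !named.contains kv.1 then d.insert kv.1 kv.2 else d)
      PySem.Dict.empty
  o.insert s (common.items.foldl (fun d kv => d.insert kv.1 kv.2) named)

def parse_search_params_alt (data_dict : List (String × String)) (searches : List String) :
    List (String × List (String × String)) :=
  ((searches.foldl (pvBStep data_dict searches) PySem.Dict.empty).items).map
    (fun p => (p.1, p.2.items))

-- ===== PRECONDITION & SPEC =====
-- Pre_ excludes (a) keys that are themselves a search name but contain no "." — there Python's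
-- key.index(".") raises ValueError, in A and in B alike; and (b) association lists with duplicate
-- keys, which represent no Python dict input (data_dict is a Python dict, its keys are unique).
def Pre_parse_search_params (data_dict : List (String × String)) (searches : List String) : Prop :=
  (data_dict.map Prod.fst).Nodup ∧ ∀ kv ∈ data_dict, kv.1 ∈ searches → '.' ∈ kv.1.toList
instance (data_dict : List (String × String)) (searches : List String) :
    Decidable (Pre_parse_search_params data_dict searches) := by
  unfold Pre_parse_search_params; infer_instance

def pvWitness_parse_search_params : (List (String × String)) × List String :=
  ([("datasets.q", "1"), ("q", "t")], ["datasets", "users"])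

def Spec_parse_search_params (data_dict : List (String × String)) (searches : List String)
    (out : List (String × List (String × String))) : Prop :=
  out = parse_search_params_alt data_dict searches
instance (data_dict : List (String × String)) (searches : List String)
    (out : List (String × List (String × String))) :
    Decidable (Spec_parse_search_params data_dict searches out) := by
  unfold Spec_parse_search_params; infer_instance

-- ===== CLAIM (what is proved, stated in full; the proofs are below) =====
def Claim_equal_parse_search_params : Prop :=
  ∀ (data_dict : List (String × String)) (searches : List String),
    Dom_parse_search_params data_dict searches →
    Pre_parse_search_params data_dict searches →
    Spec_parse_search_params data_dict searches (parse_search_params data_dict searches)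

-- ===== LEMMAS AND PROOFS =====

-- the common value both ports compute, phrased as plain lists
def pvNamed (dd : List (String × String)) (s : String) : List (String × String) :=
  (dd.filter (fun kv => pvNs kv.1 == s)).map (fun kv => (pvSuf kv.1, kv.2))
def pvCommonL (dd : List (String × String)) (ss : List String) : List (String × String) :=
  dd.filter (fun kv => !ss.contains (pvNs kv.1))
def pvExtra (dd : List (String × String)) (ss : List String) (s : String) : List (String × String) :=
  (pvCommonL dd ss).filter (fun kv => !((pvNamed dd s).map Prod.fst).contains kv.1)
def pvTarget (dd : List (String × String)) (ss : List String) :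
    List (String × List (String × String)) :=
  (PySem.Set.ofList ss).map (fun s => (s, pvNamed dd s ++ pvExtra dd ss s))
def pvMapDict (ss : List String) (F : String → PySem.Dict String String) :
    PySem.Dict String (PySem.Dict String String) :=
  ⟨(PySem.Set.ofList ss).map (fun s => (s, F s))⟩

-- ---- string facts about pvNs / pvSuf ----
lemma go_head : ∀ (fuel : Nat) (l cur : List Char) (acc : List (List Char)), l.length < fuel →
    ∃ rest, PySem.Chars.splitOn.go ['.'] fuel l cur acc
      = acc.reverse ++ (cur.reverse ++ l.takeWhile (· ≠ '.')) :: rest := by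
  intro fuel
  induction fuel with
  | zero => intro l cur acc h; simp at h
  | succ fuel ih =>
    intro l cur acc h
    match l with
    | [] =>
      refine ⟨[], ?_⟩
      rw [PySem.Chars.splitOn.go.eq_def]
      simp
    | c :: t =>
      by_cases hc : c = '.'
      · subst hc
        obtain ⟨r, hr⟩ := ih t [] (cur.reverse :: acc) (by simp at h ⊢; omega)
        refine ⟨t.takeWhile (· ≠ '.') :: r, ?_⟩
        rw [PySem.Chars.splitOn.go.eq_def]
        simp [List.isPrefixOf, hr]
      · obtain ⟨r, hr⟩ := ih t (c :: cur) acc (by simp at h ⊢; omega)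
        refine ⟨r, ?_⟩
        rw [PySem.Chars.splitOn.go.eq_def]
        simp [List.isPrefixOf, hc, hr]
        exact fun h' => absurd h'.symm hc

lemma pvNs_toList (k : String) : (pvNs k).toList = k.toList.takeWhile (· ≠ '.') := by
  unfold pvNs
  obtain ⟨r, hr⟩ := go_head (k.length + 1) k.toList [] [] (by simp)
  unfold PySem.Chars.splitOn
  rw [show k.toList.length = k.length from by simp, hr]
  simp

lemma findgo : ∀ (l : List Char) (j : Nat), PySem.Chars.find.go ['.'] l j
    = if '.' ∈ l then ((j + (l.takeWhile (· ≠ '.')).length : Nat) : Int) else -1 := by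
  intro l
  induction l with
  | nil => intro j; rw [PySem.Chars.find.go.eq_def]; simp
  | cons c t ih =>
    intro j
    rw [PySem.Chars.find.go.eq_def]
    by_cases hc : c = '.'
    · subst hc; simp [List.isPrefixOf]
    · simp [List.isPrefixOf, hc, ih (j+1), Ne.symm hc]
      split <;> push_cast <;> ring_nf

lemma pvFind_of_mem {k : String} (h : '.' ∈ k.toList) :
    PySem.Str.find k "." = ((k.toList.takeWhile (· ≠ '.')).length : Int) := by
  show PySem.Chars.find k.toList ['.'] = _
  unfold PySem.Chars.find
  rw [findgo]
  simp [h]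

lemma pvSuf_toList {k : String} (h : '.' ∈ k.toList) :
    (pvSuf k).toList = k.toList.drop ((k.toList.takeWhile (· ≠ '.')).length + 1) := by
  unfold pvSuf PySem.Str.slice
  rw [pvFind_of_mem h]
  rw [show ((k.toList.takeWhile (· ≠ '.')).length : Int) + 1 = (((k.toList.takeWhile (· ≠ '.')).length + 1 : Nat) : Int) from by push_cast; ring]
  rw [show (PySem.Chars.slice k.toList (some (((k.toList.takeWhile (· ≠ '.')).length + 1 : Nat) : Int)) none) = PySem.List.slice k.toList (some (((k.toList.takeWhile (· ≠ '.')).length + 1 : Nat) : Int)) none from rfl]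
  rw [PySem.List.slice_from_natCast]
  simp

lemma pvDecomp {k : String} (h : '.' ∈ k.toList) :
    k.toList = k.toList.takeWhile (· ≠ '.') ++ '.' :: (pvSuf k).toList := by
  have hsplit := List.takeWhile_append_dropWhile (p := fun c => decide (c ≠ '.')) (l := k.toList)
  have hdw : k.toList.dropWhile (fun c => decide (c ≠ '.')) = k.toList.drop ((k.toList.takeWhile (fun c => decide (c ≠ '.'))).length) := by
    conv_lhs => rw [← List.drop_left (l₁ := List.takeWhile (fun c => decide (c ≠ '.')) k.toList) (l₂ := List.dropWhile (fun c => decide (c ≠ '.')) k.toList)]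
    rw [hsplit]
  have hne : k.toList.dropWhile (fun c => decide (c ≠ '.')) ≠ [] := by
    intro hnil
    rw [List.dropWhile_eq_nil_iff] at hnil
    simpa using hnil _ h
  have hhead : (k.toList.dropWhile (fun c => decide (c ≠ '.'))).head hne = '.' := by
    have := List.head_dropWhile_not (p := fun c => decide (c ≠ '.')) (l := k.toList) hne
    simpa using this
  have htail : (k.toList.dropWhile (fun c => decide (c ≠ '.'))).tail
      = k.toList.drop ((k.toList.takeWhile (fun c => decide (c ≠ '.'))).length + 1) := by
    rw [hdw, List.tail_drop]
  rw [pvSuf_toList h]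
  conv_lhs => rw [← hsplit]
  show _ ++ _ = _ ++ _
  congr 1
  obtain ⟨a, t', he⟩ := List.exists_cons_of_ne_nil hne
  simp only [he, List.head_cons, List.tail_cons] at hhead htail ⊢
  rw [hhead, htail]

lemma pvInj {k1 k2 : String} (h1 : '.' ∈ k1.toList) (h2 : '.' ∈ k2.toList)
    (hn : pvNs k1 = pvNs k2) (hs : pvSuf k1 = pvSuf k2) : k1 = k2 := by
  have d1 := pvDecomp h1
  have d2 := pvDecomp h2
  have hn' : k1.toList.takeWhile (· ≠ '.') = k2.toList.takeWhile (· ≠ '.') := by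
    rw [← pvNs_toList, ← pvNs_toList, hn]
  have : k1.toList = k2.toList := by rw [d1, d2, hn', hs]
  exact String.toList_injective this

lemma pvNs_nodot {k : String} (h : '.' ∉ k.toList) : pvNs k = k := by
  apply String.toList_injective
  rw [pvNs_toList]
  rw [List.takeWhile_eq_self_iff.mpr]
  intro x hx
  simp
  exact fun he => h (he ▸ hx)

-- generic loop-shape lemma: a fold that skips on a test is a fold over the filtered list
lemma pvFoldlIf {α β : Type} (p : α → Bool) (f : β → α → β) :
    ∀ (l : List α) (a : β),
    l.foldl (fun acc x => if p x then f acc x else acc) a = (l.filter p).foldl f a := by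
  intro l
  induction l with
  | nil => intro a; rfl
  | cons x t ih =>
    intro a
    by_cases hx : p x = true
    · simp [List.filter_cons, hx, ih]
    · simp at hx
      simp [List.filter_cons, hx, ih]

-- inserting a pair that is already present (with unique keys) is a no-op
lemma pvInsertNoop {ν : Type} (d : PySem.Dict String ν) (k : String) (v : ν)
    (hnd : d.keys.Nodup) (hmem : (k, v) ∈ d.items) : d.insert k v = d := by
  have hc : d.contains k = true := by
    rw [PySem.Dict.contains_iff_mem_keys]
    exact List.mem_map_of_mem hmem
  apply PySem.Dict.ext
  rw [PySem.Dict.items_insert_of_contains d v hc]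
  conv_rhs => rw [← List.map_id d.items]
  apply List.map_congr_left
  rintro ⟨pk, pv⟩ hp
  by_cases hpk : pk = k
  · subst hpk
    have h1 : d.get? pk = some pv := PySem.Dict.get?_of_mem_items d hp hnd
    have h2 : d.get? pk = some v := PySem.Dict.get?_of_mem_items d hmem hnd
    rw [h1] at h2
    injection h2 with h
    simp [h]
  · simp [hpk]

-- a fold of inserts with a value that depends only on the key
lemma pvFoldlInsertFun {ν : Type} (V : String → ν) :
    ∀ (ss l : List String), l.Nodup →
    ((ss.foldl (fun (o : PySem.Dict String ν) s => o.insert s (V s))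
        ⟨l.map (fun s => (s, V s))⟩).items)
      = (PySem.Set.update l ss).map (fun s => (s, V s)) := by
  intro ss
  induction ss with
  | nil => intro l hl; rfl
  | cons s t ih =>
    intro l hl
    rw [List.foldl_cons, PySem.Set.update_cons]
    by_cases hs : s ∈ l
    · have hnoop : (⟨l.map (fun s => (s, V s))⟩ : PySem.Dict String ν).insert s (V s)
          = ⟨l.map (fun s => (s, V s))⟩ := by
        apply pvInsertNoop
        · rw [PySem.Dict.keys_mk, List.map_map]
          simpa [Function.comp_def] using hl
        · exact List.mem_map_of_mem hs
      rw [hnoop]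
      have hadd : PySem.Set.add l s = l := by
        unfold PySem.Set.add
        simp [hs]
      rw [hadd]
      exact ih l hl
    · have hins : (⟨l.map (fun s => (s, V s))⟩ : PySem.Dict String ν).insert s (V s)
          = ⟨(l ++ [s]).map (fun s => (s, V s))⟩ := by
        apply PySem.Dict.ext
        rw [PySem.Dict.items_insert_of_not_contains]
        · simp
        · rw [PySem.Dict.contains_mk]
          simp
          intro x hx
          exact fun he => absurd (he ▸ hx) hs
      rw [hins]
      have hadd : PySem.Set.add l s = l ++ [s] := by
        unfold PySem.Set.add
        simp [hs]
      rw [hadd]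
      refine ih (l ++ [s]) ?_
      rw [List.nodup_append]
      refine ⟨hl, List.nodup_singleton s, ?_⟩
      intro a ha b hb
      simp at hb
      exact fun he => hs ((he.trans hb) ▸ ha)

lemma pvMapDict_keys (ss : List String) (F : String → PySem.Dict String String) :
    (pvMapDict ss F).keys = PySem.Set.ofList ss := by
  unfold pvMapDict
  rw [PySem.Dict.keys_mk, List.map_map]
  simp [Function.comp_def]

lemma pvMapDict_keys_nodup (ss : List String) (F : String → PySem.Dict String String) :
    (pvMapDict ss F).keys.Nodup := by
  rw [pvMapDict_keys]; exact PySem.Set.nodup_ofList ss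

lemma pvMapDict_getD {ss : List String} {t : String} (F : String → PySem.Dict String String)
    (ht : t ∈ PySem.Set.ofList ss) (d0 : PySem.Dict String String) :
    (pvMapDict ss F).getD t d0 = F t := by
  exact PySem.Dict.getD_of_mem_items (pvMapDict ss F) (List.mem_map_of_mem (f := fun s => (s, F s)) ht) (pvMapDict_keys_nodup ss F) d0

lemma pvMapDict_contains {ss : List String} {t : String} (F : String → PySem.Dict String String)
    (ht : t ∈ PySem.Set.ofList ss) : (pvMapDict ss F).contains t = true := by
  rw [PySem.Dict.contains_iff_mem_keys, pvMapDict_keys]; exact ht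

lemma pvMapDict_insert {ss : List String} {t : String} (F : String → PySem.Dict String String)
    (ht : t ∈ PySem.Set.ofList ss) (v : PySem.Dict String String) :
    (pvMapDict ss F).insert t v = pvMapDict ss (fun s => if s = t then v else F s) := by
  apply PySem.Dict.ext
  rw [PySem.Dict.items_insert_of_contains _ v (pvMapDict_contains F ht)]
  show List.map _ (List.map _ _) = _
  rw [List.map_map]
  apply List.map_congr_left
  intro s _
  by_cases hst : s = t
  · subst hst; simp
  · simp [hst]

lemma pvMapDict_congr {ss : List String} {F G : String → PySem.Dict String String}
    (h : ∀ s ∈ PySem.Set.ofList ss, F s = G s) : pvMapDict ss F = pvMapDict ss G := by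
  apply PySem.Dict.ext
  apply List.map_congr_left
  intro s hs
  rw [h s hs]

lemma pvNamed_append (p q : List (String × String)) (s : String) :
    pvNamed (p ++ q) s = pvNamed p s ++ pvNamed q s := by
  unfold pvNamed; rw [List.filter_append, List.map_append]

lemma pvCommonL_append (p q : List (String × String)) (ss : List String) :
    pvCommonL (p ++ q) ss = pvCommonL p ss ++ pvCommonL q ss := by
  unfold pvCommonL; rw [List.filter_append]

lemma pvNamed_singleton (kv : String × String) (s : String) :
    pvNamed [kv] s = if pvNs kv.1 == s then [(pvSuf kv.1, kv.2)] else [] := by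
  unfold pvNamed
  rcases h : (pvNs kv.1 == s) with _ | _
  · simp [List.filter_singleton, h]
  · simp [List.filter_singleton, h]

lemma pvCommonL_singleton (kv : String × String) (ss : List String) :
    pvCommonL [kv] ss = if ss.contains (pvNs kv.1) then [] else [kv] := by
  unfold pvCommonL
  by_cases h : pvNs kv.1 ∈ ss
  · simp [List.filter_singleton, h]
  · simp [List.filter_singleton, h]

lemma pvDot {k : String} {ss : List String} (hns : pvNs k ∈ ss)
    (h : k ∈ ss → '.' ∈ k.toList) : '.' ∈ k.toList := by
  by_cases hd : '.' ∈ k.toList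
  · exact hd
  · exact h (pvNs_nodot hd ▸ hns)

lemma pvContainsMk (l : List (String × String)) (k : String) :
    (⟨l⟩ : PySem.Dict String String).contains k = (l.map Prod.fst).contains k := by
  rw [PySem.Dict.contains_mk]
  induction l with
  | nil => rfl
  | cons p t ih =>
    simp [ih]
    by_cases hb : p.1 = k
    · subst hb; simp
    · have h1 : (p.1 == k) = false := by simpa using hb
      have h2 : (k == p.1) = false := by simpa using fun he => hb he.symm
      rw [h1, h2]

lemma pvSufNodup {dd : List (String × String)} {ss : List String}
    (hnd : (dd.map Prod.fst).Nodup)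
    (hdot : ∀ kv ∈ dd, kv.1 ∈ ss → '.' ∈ kv.1.toList) {s : String} (hs : s ∈ ss) :
    ((dd.filter (fun kv => pvNs kv.1 == s)).map (fun kv => pvSuf kv.1)).Nodup := by
  apply List.Nodup.map_on
  · intro x hx y hy hxy
    have hxd := List.mem_filter.mp hx
    have hyd := List.mem_filter.mp hy
    have hxs : pvNs x.1 = s := by simpa using hxd.2
    have hys : pvNs y.1 = s := by simpa using hyd.2
    have hdx : '.' ∈ x.1.toList := pvDot (hxs ▸ hs) (hdot x hxd.1)
    have hdy : '.' ∈ y.1.toList := pvDot (hys ▸ hs) (hdot y hyd.1)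
    have hkey : x.1 = y.1 := pvInj hdx hdy (hxs.trans hys.symm) hxy
    exact List.inj_on_of_nodup_map (f := Prod.fst) hnd hxd.1 hyd.1 hkey
  · exact ((hnd.of_map).filter _)

lemma pvMkInsertFresh {ν : Type} (l : List (String × ν)) (k : String) (v : ν)
    (h : k ∉ l.map Prod.fst) : (⟨l⟩ : PySem.Dict String ν).insert k v = ⟨l ++ [(k, v)]⟩ := by
  have hc : (⟨l⟩ : PySem.Dict String ν).contains k = false := by
    rw [PySem.Dict.contains_mk]
    apply List.any_eq_false.mpr
    intro p hp
    simp only [beq_iff_eq]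
    intro he
    exact h (he ▸ List.mem_map_of_mem hp)
  apply PySem.Dict.ext
  rw [PySem.Dict.items_insert_of_not_contains ⟨l⟩ v hc]

lemma pvNamedKeys (p : List (String × String)) (s : String) :
    (pvNamed p s).map Prod.fst = (p.filter (fun kv => pvNs kv.1 == s)).map (fun kv => pvSuf kv.1) := by
  unfold pvNamed
  rw [List.map_map]
  rfl

lemma pvALoop1 (ss : List String) :
    ∀ (l p : List (String × String)),
    ((p ++ l).map Prod.fst).Nodup →
    (∀ kv ∈ p ++ l, kv.1 ∈ ss → '.' ∈ kv.1.toList) →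
    l.foldl (pvAStep1 ss)
      (pvMapDict ss (fun s => ⟨pvNamed p s⟩), (⟨pvCommonL p ss⟩ : PySem.Dict String String))
      = (pvMapDict ss (fun s => ⟨pvNamed (p ++ l) s⟩), ⟨pvCommonL (p ++ l) ss⟩) := by
  intro l
  induction l with
  | nil => intro p _ _; rw [List.foldl_nil, List.append_nil]
  | cons kv t ih =>
    intro p hnd hdot
    have hknotp : kv.1 ∉ p.map Prod.fst := by
      rw [List.map_append] at hnd
      have hdisj := (List.nodup_append.mp hnd).2.2
      intro hkp
      exact hdisj kv.1 hkp kv.1 (by simp) rfl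
    rw [List.foldl_cons]
    have hstep : pvAStep1 ss (pvMapDict ss (fun s => ⟨pvNamed p s⟩), (⟨pvCommonL p ss⟩ : PySem.Dict String String)) kv
        = (pvMapDict ss (fun s => ⟨pvNamed (p ++ [kv]) s⟩), ⟨pvCommonL (p ++ [kv]) ss⟩) := by
      by_cases hin : pvNs kv.1 ∈ ss
      · have hinb : ss.contains (pvNs kv.1) = true := by simpa using hin
        have hmemof : pvNs kv.1 ∈ PySem.Set.ofList ss := by
          simpa [PySem.Set.mem_ofList] using hin
        have hfresh : pvSuf kv.1 ∉ (pvNamed p (pvNs kv.1)).map Prod.fst := by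
          rw [pvNamedKeys]
          intro hmem
          rcases List.mem_map.mp hmem with ⟨kv', hkv', hsuf⟩
          have hkvf := List.mem_filter.mp hkv'
          have hns' : pvNs kv'.1 = pvNs kv.1 := by simpa using hkvf.2
          have hd' : '.' ∈ kv'.1.toList :=
            pvDot (hns' ▸ hin) (hdot kv' (List.mem_append_left _ hkvf.1))
          have hdk : '.' ∈ kv.1.toList := pvDot hin (hdot kv (by simp))
          have : kv'.1 = kv.1 := pvInj hd' hdk hns' hsuf
          exact hknotp (this ▸ List.mem_map_of_mem hkvf.1)
        simp only [pvAStep1, hinb, if_true, PySem.Dict.modify]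
        rw [pvMapDict_getD _ hmemof PySem.Dict.empty]
        rw [show (⟨pvNamed p (pvNs kv.1)⟩ : PySem.Dict String String).insert (pvSuf kv.1) kv.2
            = ⟨pvNamed p (pvNs kv.1) ++ [(pvSuf kv.1, kv.2)]⟩ from pvMkInsertFresh _ _ _ hfresh]
        rw [pvMapDict_insert _ hmemof]
        refine Prod.ext ?_ ?_
        · apply pvMapDict_congr
          intro s _
          rw [pvNamed_append, pvNamed_singleton]
          by_cases hst : s = pvNs kv.1
          · subst hst
            simp
          · have hb : (pvNs kv.1 == s) = false := by simpa using fun he => hst he.symm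
            simp [hst, hb]
        · rw [pvCommonL_append, pvCommonL_singleton, if_pos hinb]
          simp
      · have hinb : ss.contains (pvNs kv.1) = false := by simpa using hin
        simp only [pvAStep1, hinb, Bool.false_eq_true, if_false]
        refine Prod.ext ?_ ?_
        · apply pvMapDict_congr
          intro s hs
          rw [pvNamed_append, pvNamed_singleton]
          have hb : (pvNs kv.1 == s) = false := by
            have hs' : s ∈ ss := by simpa [PySem.Set.mem_ofList] using hs
            simpa using fun he => hin (by rw [he]; exact hs')
          simp [hb]
        · rw [show (⟨pvCommonL p ss⟩ : PySem.Dict String String).insert kv.1 kv.2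
              = ⟨pvCommonL p ss ++ [(kv.1, kv.2)]⟩ from pvMkInsertFresh _ _ _ (by
                intro hmem
                apply hknotp
                unfold pvCommonL at hmem
                rcases List.mem_map.mp hmem with ⟨kv', hkv', hfst⟩
                exact hfst ▸ List.mem_map_of_mem (List.mem_filter.mp hkv').1)]
          rw [pvCommonL_append, pvCommonL_singleton, if_neg (by simp [hin])]
    rw [hstep]
    have hassoc : (p ++ [kv]) ++ t = p ++ kv :: t := by simp
    have := ih (p ++ [kv]) (by rw [hassoc]; exact hnd) (by rw [hassoc]; exact hdot)
    rw [hassoc] at this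
    exact this

lemma pvALoop2Inner (ss : List String) (t : String) (ht : t ∈ PySem.Set.ofList ss)
    (N : List (String × String)) :
    ∀ (c e : List (String × String)) (F : String → PySem.Dict String String),
    (c.map Prod.fst).Nodup →
    (∀ kv ∈ c, kv.1 ∉ e.map Prod.fst) →
    F t = ⟨N ++ e⟩ →
    c.foldl (pvAStep2 t) (pvMapDict ss F)
      = pvMapDict ss (fun s => if s = t
          then ⟨N ++ e ++ c.filter (fun kv => !(N.map Prod.fst).contains kv.1)⟩ else F s) := by
  intro c
  induction c with
  | nil =>
    intro e F _ _ hF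
    rw [List.foldl_nil, List.filter_nil, List.append_nil]
    apply pvMapDict_congr
    intro s _
    by_cases hst : s = t
    · subst hst; rw [if_pos rfl, hF]
    · rw [if_neg hst]
  | cons kv c ih =>
    intro e F hnd hne hF
    rw [List.foldl_cons]
    have hgd : (pvMapDict ss F).getD t PySem.Dict.empty = ⟨N ++ e⟩ := by
      rw [pvMapDict_getD F ht, hF]
    have hcond : (⟨N ++ e⟩ : PySem.Dict String String).contains kv.1
        = (N.map Prod.fst).contains kv.1 := by
      rw [pvContainsMk, List.map_append]
      have he : kv.1 ∉ e.map Prod.fst := hne kv (by simp)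
      by_cases hn : kv.1 ∈ N.map Prod.fst
      · simp [hn]
      · simp [hn, he]
    by_cases hN : (N.map Prod.fst).contains kv.1 = true
    · have hstep : pvAStep2 t (pvMapDict ss F) kv = pvMapDict ss F := by
        unfold pvAStep2
        rw [hgd, hcond, hN]
        simp
      rw [hstep]
      have hnd2 : (kv.1 :: c.map Prod.fst).Nodup := by simpa using hnd
      rw [ih e F (hnd2.of_cons) (fun kv' h' => hne kv' (List.mem_cons_of_mem _ h')) hF]
      apply pvMapDict_congr
      intro s _
      by_cases hst : s = t
      · subst hst
        rw [if_pos rfl, if_pos rfl, List.filter_cons]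
        have hcb : (!(List.map Prod.fst N).contains kv.1) = false := by rw [hN]; rfl
        rw [hcb]
        simp
      · rw [if_neg hst, if_neg hst]
    · have hNf : (N.map Prod.fst).contains kv.1 = false := Bool.eq_false_iff.mpr hN
      have hfresh : kv.1 ∉ (N ++ e).map Prod.fst := by
        rw [List.map_append]
        intro hmem
        rcases List.mem_append.mp hmem with h | h
        · exact hN (by simpa using h)
        · exact hne kv (by simp) h
      have hstep : pvAStep2 t (pvMapDict ss F) kv
          = pvMapDict ss (fun s => if s = t then ⟨N ++ (e ++ [kv])⟩ else F s) := by
        unfold pvAStep2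
        rw [hgd, hcond, hNf]
        simp only [Bool.false_eq_true, if_false, PySem.Dict.modify]
        rw [pvMapDict_getD F ht, hF]
        rw [pvMkInsertFresh _ _ _ hfresh]
        rw [pvMapDict_insert F ht]
        apply pvMapDict_congr
        intro s _
        by_cases hst : s = t
        · subst hst; rw [if_pos rfl, if_pos rfl]
          simp
        · rw [if_neg hst, if_neg hst]
      rw [hstep]
      have hnd2 : (kv.1 :: c.map Prod.fst).Nodup := by simpa using hnd
      have hnd' : (c.map Prod.fst).Nodup := hnd2.of_cons
      have hhead : kv.1 ∉ c.map Prod.fst := (List.nodup_cons.mp hnd2).1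
      have hne' : ∀ kv' ∈ c, kv'.1 ∉ (e ++ [kv]).map Prod.fst := by
        intro kv' h' hmem
        rw [List.map_append] at hmem
        rcases List.mem_append.mp hmem with h | h
        · exact hne kv' (List.mem_cons_of_mem _ h') h
        · simp at h
          exact hhead (h ▸ List.mem_map_of_mem h')
      rw [ih (e ++ [kv]) _ hnd' hne' (by rw [if_pos rfl])]
      apply pvMapDict_congr
      intro s _
      by_cases hst : s = t
      · subst hst
        rw [if_pos rfl, if_pos rfl, List.filter_cons]
        have : (!(N.map Prod.fst).contains kv.1) = true := by rw [hNf]; rfl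
        rw [this]
        simp
      · rw [if_neg hst, if_neg hst, if_neg hst]

lemma pvALoop2 (dd : List (String × String)) (ss : List String)
    (hnd : (dd.map Prod.fst).Nodup) :
    ∀ (q r : List String), r ++ q = PySem.Set.ofList ss →
    q.foldl (fun o t => (pvCommonL dd ss).foldl (pvAStep2 t) o)
      (pvMapDict ss (fun s => if s ∈ r then ⟨pvNamed dd s ++ pvExtra dd ss s⟩ else ⟨pvNamed dd s⟩))
    = pvMapDict ss (fun s => ⟨pvNamed dd s ++ pvExtra dd ss s⟩) := by
  intro q
  induction q with
  | nil =>
    intro r hr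
    rw [List.append_nil] at hr
    rw [List.foldl_nil]
    apply pvMapDict_congr
    intro s hs
    rw [if_pos (hr ▸ hs)]
  | cons t q ih =>
    intro r hr
    have hofl : (r ++ t :: q).Nodup := by rw [hr]; exact PySem.Set.nodup_ofList ss
    have htr : t ∉ r := by
      have hdisj := (List.nodup_append.mp hofl).2.2
      intro htr
      exact hdisj t htr t (by simp) rfl
    have ht : t ∈ PySem.Set.ofList ss := by rw [← hr]; simp
    have hcnd : ((pvCommonL dd ss).map Prod.fst).Nodup := by
      unfold pvCommonL
      exact (List.Sublist.map Prod.fst List.filter_sublist).nodup hnd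
    rw [List.foldl_cons]
    rw [pvALoop2Inner ss t ht (pvNamed dd t) (pvCommonL dd ss) []
        _ hcnd (by simp) (by rw [if_neg htr, List.append_nil])]
    have hshape : pvMapDict ss (fun s => if s = t
          then ⟨pvNamed dd t ++ [] ++ (pvCommonL dd ss).filter (fun kv => !((pvNamed dd t).map Prod.fst).contains kv.1)⟩
          else if s ∈ r then ⟨pvNamed dd s ++ pvExtra dd ss s⟩ else ⟨pvNamed dd s⟩)
        = pvMapDict ss (fun s => if s ∈ r ++ [t] then ⟨pvNamed dd s ++ pvExtra dd ss s⟩ else ⟨pvNamed dd s⟩) := by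
      apply pvMapDict_congr
      intro s _
      by_cases hst : s = t
      · subst hst
        rw [if_pos rfl, if_pos (by simp)]
        rw [List.append_nil]
        rfl
      · rw [if_neg hst]
        by_cases hsr : s ∈ r
        · rw [if_pos hsr, if_pos (by simp [hsr])]
        · rw [if_neg hsr, if_neg (by simp [hsr, hst])]
    rw [hshape]
    exact ih (r ++ [t]) (by simpa using hr)

def pvVBnamed (dd : List (String × String)) (s : String) : PySem.Dict String String :=
  dd.foldl (fun d kv => if pvNs kv.1 == s then d.insert (pvSuf kv.1) kv.2 else d) PySem.Dict.empty
def pvVBcommon (dd : List (String × String)) (ss : List String) (s : String) : PySem.Dict String String :=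
  dd.foldl (fun d kv => if !ss.contains (pvNs kv.1) && !(pvVBnamed dd s).contains kv.1 then d.insert kv.1 kv.2 else d) PySem.Dict.empty
def pvVBval (dd : List (String × String)) (ss : List String) (s : String) : PySem.Dict String String :=
  (pvVBcommon dd ss s).items.foldl (fun d kv => d.insert kv.1 kv.2) (pvVBnamed dd s)

lemma pvBStep_eq (dd : List (String × String)) (ss : List String) :
    pvBStep dd ss = fun o s => o.insert s (pvVBval dd ss s) := rfl

lemma pvFoldlInsertFreshList {ν β : Type} (key : β → String) (val : β → ν) :
    ∀ (L : List β) (B : List (String × ν)),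
    (∀ a ∈ L, key a ∉ B.map Prod.fst) → (L.map key).Nodup →
    L.foldl (fun d a => d.insert (key a) (val a)) (⟨B⟩ : PySem.Dict String ν)
      = ⟨B ++ L.map (fun a => (key a, val a))⟩ := by
  intro L
  induction L with
  | nil => intro B _ _; rw [List.foldl_nil, List.map_nil, List.append_nil]
  | cons a L ih =>
    intro B hfresh hnd
    rw [List.foldl_cons]
    rw [pvMkInsertFresh B (key a) (val a) (hfresh a (by simp))]
    have hnd2 : (key a :: L.map key).Nodup := by simpa using hnd
    rw [ih (B ++ [(key a, val a)]) ?_ hnd2.of_cons]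
    · rw [List.map_cons]
      apply PySem.Dict.ext
      show (B ++ [(key a, val a)]) ++ _ = B ++ _
      rw [List.append_assoc]
      rfl
    · intro b hb hmem
      rw [List.map_append] at hmem
      rcases List.mem_append.mp hmem with h | h
      · exact hfresh b (List.mem_cons_of_mem _ hb) h
      · simp at h
        exact (List.nodup_cons.mp hnd2).1 (h ▸ List.mem_map_of_mem hb)

lemma pvVBnamed_eq {dd : List (String × String)} {ss : List String}
    (hnd : (dd.map Prod.fst).Nodup)
    (hdot : ∀ kv ∈ dd, kv.1 ∈ ss → '.' ∈ kv.1.toList) {s : String} (hs : s ∈ ss) :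
    pvVBnamed dd s = ⟨pvNamed dd s⟩ := by
  unfold pvVBnamed
  rw [pvFoldlIf]
  have h := pvFoldlInsertFreshList (fun kv : String × String => pvSuf kv.1) (fun kv => kv.2)
      (dd.filter (fun kv => pvNs kv.1 == s)) [] (by simp) (pvSufNodup hnd hdot hs)
  exact h

lemma pvExtraKeysNodup {dd : List (String × String)} {ss : List String} {s : String}
    (hnd : (dd.map Prod.fst).Nodup) :
    ((pvExtra dd ss s).map (fun kv : String × String => kv.1)).Nodup := by
  unfold pvExtra pvCommonL
  exact (List.Sublist.map _ ((List.filter_sublist).trans (List.filter_sublist))).nodup hnd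

lemma pvVBcommon_eq {dd : List (String × String)} {ss : List String}
    (hnd : (dd.map Prod.fst).Nodup)
    (hdot : ∀ kv ∈ dd, kv.1 ∈ ss → '.' ∈ kv.1.toList) {s : String} (hs : s ∈ ss) :
    pvVBcommon dd ss s = ⟨pvExtra dd ss s⟩ := by
  unfold pvVBcommon
  rw [pvVBnamed_eq hnd hdot hs]
  rw [pvFoldlIf]
  have hlist : dd.filter (fun kv => !ss.contains (pvNs kv.1) && !(⟨pvNamed dd s⟩ : PySem.Dict String String).contains kv.1)
      = pvExtra dd ss s := by
    unfold pvExtra pvCommonL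
    rw [List.filter_filter]
    apply List.filter_congr
    intro kv _
    rw [pvContainsMk]
    rw [Bool.and_comm]
  rw [hlist]
  have h2 : List.foldl (fun d kv => d.insert kv.1 kv.2) PySem.Dict.empty (pvExtra dd ss s)
      = (⟨[] ++ (pvExtra dd ss s).map (fun a => (a.1, a.2))⟩ : PySem.Dict String String) :=
    pvFoldlInsertFreshList (fun kv : String × String => kv.1) (fun kv => kv.2)
      (pvExtra dd ss s) [] (by simp) (pvExtraKeysNodup hnd)
  rw [h2]
  apply PySem.Dict.ext
  show [] ++ _ = _
  rw [List.nil_append]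
  simp

lemma pvVBval_items {dd : List (String × String)} {ss : List String}
    (hnd : (dd.map Prod.fst).Nodup)
    (hdot : ∀ kv ∈ dd, kv.1 ∈ ss → '.' ∈ kv.1.toList) {s : String} (hs : s ∈ ss) :
    (pvVBval dd ss s).items = pvNamed dd s ++ pvExtra dd ss s := by
  unfold pvVBval
  rw [pvVBnamed_eq hnd hdot hs, pvVBcommon_eq hnd hdot hs]
  have hext : (⟨pvExtra dd ss s⟩ : PySem.Dict String String).items = pvExtra dd ss s := rfl
  rw [hext]
  have hfr : ∀ a ∈ pvExtra dd ss s, (fun kv : String × String => kv.1) a ∉ (pvNamed dd s).map Prod.fst := by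
    intro a ha
    have hcond := (List.mem_filter.mp ha).2
    simpa using hcond
  have h2 : List.foldl (fun d kv => d.insert kv.1 kv.2) (⟨pvNamed dd s⟩ : PySem.Dict String String) (pvExtra dd ss s)
      = (⟨pvNamed dd s ++ (pvExtra dd ss s).map (fun a => (a.1, a.2))⟩ : PySem.Dict String String) :=
    pvFoldlInsertFreshList (fun kv : String × String => kv.1) (fun kv => kv.2)
      (pvExtra dd ss s) (pvNamed dd s) hfr (pvExtraKeysNodup hnd)
  rw [h2]
  show pvNamed dd s ++ _ = _
  simp

lemma pvA_eq (dd : List (String × String)) (ss : List String)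
    (hnd : (dd.map Prod.fst).Nodup)
    (hdot : ∀ kv ∈ dd, kv.1 ∈ ss → '.' ∈ kv.1.toList) :
    parse_search_params dd ss = pvTarget dd ss := by
  have h0 : (ss.foldl (fun o s => o.insert s PySem.Dict.empty) PySem.Dict.empty :
      PySem.Dict String (PySem.Dict String String)) = pvMapDict ss (fun s => ⟨pvNamed [] s⟩) := by
    apply PySem.Dict.ext
    exact pvFoldlInsertFun (fun (_ : String) => (PySem.Dict.empty : PySem.Dict String String)) ss [] List.nodup_nil
  have h1 : dd.foldl (pvAStep1 ss)
      (ss.foldl (fun o s => o.insert s PySem.Dict.empty) PySem.Dict.empty, PySem.Dict.empty)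
      = (pvMapDict ss (fun s => ⟨pvNamed dd s⟩), (⟨pvCommonL dd ss⟩ : PySem.Dict String String)) := by
    rw [h0]
    have hl := pvALoop1 ss dd [] (by simpa using hnd) (by simpa using hdot)
    simp only [List.nil_append] at hl
    exact hl
  show ((dd.foldl (pvAStep1 ss)
      (ss.foldl (fun o s => o.insert s PySem.Dict.empty) PySem.Dict.empty, PySem.Dict.empty)).1.keys.foldl
      (fun o search => (dd.foldl (pvAStep1 ss)
        (ss.foldl (fun o s => o.insert s PySem.Dict.empty) PySem.Dict.empty, PySem.Dict.empty)).2.items.foldl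
        (pvAStep2 search) o)
      (dd.foldl (pvAStep1 ss)
        (ss.foldl (fun o s => o.insert s PySem.Dict.empty) PySem.Dict.empty, PySem.Dict.empty)).1).items.map
      (fun p => (p.1, p.2.items)) = pvTarget dd ss
  rw [h1]
  show ((pvMapDict ss (fun s => ⟨pvNamed dd s⟩)).keys.foldl
      (fun o search => (pvCommonL dd ss).foldl (pvAStep2 search) o)
      (pvMapDict ss (fun s => ⟨pvNamed dd s⟩))).items.map (fun p => (p.1, p.2.items)) = pvTarget dd ss
  rw [pvMapDict_keys]
  have hinit : pvMapDict ss (fun s => ⟨pvNamed dd s⟩)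
      = pvMapDict ss (fun s => if s ∈ ([] : List String) then ⟨pvNamed dd s ++ pvExtra dd ss s⟩ else ⟨pvNamed dd s⟩) := by
    apply pvMapDict_congr
    intro s _
    rw [if_neg (List.not_mem_nil)]
  rw [hinit]
  rw [pvALoop2 dd ss hnd (PySem.Set.ofList ss) [] (List.nil_append _)]
  show ((PySem.Set.ofList ss).map (fun s => (s, (⟨pvNamed dd s ++ pvExtra dd ss s⟩ : PySem.Dict String String)))).map (fun p => (p.1, p.2.items)) = pvTarget dd ss
  rw [List.map_map]
  rfl

lemma pvB_eq (dd : List (String × String)) (ss : List String)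
    (hnd : (dd.map Prod.fst).Nodup)
    (hdot : ∀ kv ∈ dd, kv.1 ∈ ss → '.' ∈ kv.1.toList) :
    parse_search_params_alt dd ss = pvTarget dd ss := by
  unfold parse_search_params_alt
  rw [pvBStep_eq]
  have hit : (ss.foldl (fun o s => o.insert s (pvVBval dd ss s)) PySem.Dict.empty).items
      = (PySem.Set.ofList ss).map (fun s => (s, pvVBval dd ss s)) :=
    pvFoldlInsertFun (pvVBval dd ss) ss [] List.nodup_nil
  rw [hit, List.map_map]
  unfold pvTarget
  apply List.map_congr_left
  intro s hs
  have hs' : s ∈ ss := by simpa [PySem.Set.mem_ofList] using hs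
  show (s, (pvVBval dd ss s).items) = (s, pvNamed dd s ++ pvExtra dd ss s)
  rw [pvVBval_items hnd hdot hs']

-- ===== VERDICT (by name: the statement is the Claim_ definition above) =====
theorem parse_search_params_spec : Claim_equal_parse_search_params := by
  intro data_dict searches _ hpre
  unfold Spec_parse_search_params
  rw [pvA_eq data_dict searches hpre.1 hpre.2, pvB_eq data_dict searches hpre.1 hpre.2]
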